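-- pv_equiv track=rewrite | github.com/nkchangliu/puzzles | leetcode/subsequence_sum.py | subsequence_sum
-- ===== SOURCE A (Python) =====
-- def subsequence_sum(lst):
--     if len(lst) < 2:
--         return 0
--     lst.sort()
--     last_count = 1
--     old_val = lst[1] - lst[0]
--     total = old_val
--     old_two = 1 # 2 ^ 0
--
--     for i in range(2, len(lst)):
--         diff = lst[i] - lst[i - 1]
--         old_two *= 2
--         new_count = last_count + old_two
--         new_val = new_count * diff + 2 * old_val
--         total = (total + new_val) % (10**9 + 7)
--         old_val, last_count = new_val, new_count
--     return total
-- ===== SOURCE B (Python) =====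
-- def subsequence_sum(lst):
--     if len(lst) < 2:
--         return 0
--     lst.sort()
--     n = len(lst)
--     M = 10 ** 9 + 7
--     total = 0
--     for k in range(1, n):
--         total += (lst[k] - lst[k - 1]) * (pow(2, k, M) - 1) * (pow(2, n - k, M) - 1)
--     return total % M
-- ===== Notes on version B (the rewrite author's own statement) =====
-- stated objective: faster
-- what changed: Replaces A's carried recurrence (new_val = new_count*diff + 2*old_val, with unbounded old_val/old_two and a running mod on total only) by the independent per-gap closed form sum((s[k]-s[k-1])*(pow(2,k,M)-1)*(pow(2,n-k,M)-1)) over the sorted list with a single final mod.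
-- intended difference: On two-element lists whose gap is at least 10^9+7, A returns the raw difference max-min (its loop never runs so the mod is never applied), while B returns it reduced mod 10^9+7, the modular answer the function intends and applies everywhere else. — e.g. on subsequence_sum([0, 1000000007]): A returns 1000000007, B returns 0
import Mathlib
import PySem

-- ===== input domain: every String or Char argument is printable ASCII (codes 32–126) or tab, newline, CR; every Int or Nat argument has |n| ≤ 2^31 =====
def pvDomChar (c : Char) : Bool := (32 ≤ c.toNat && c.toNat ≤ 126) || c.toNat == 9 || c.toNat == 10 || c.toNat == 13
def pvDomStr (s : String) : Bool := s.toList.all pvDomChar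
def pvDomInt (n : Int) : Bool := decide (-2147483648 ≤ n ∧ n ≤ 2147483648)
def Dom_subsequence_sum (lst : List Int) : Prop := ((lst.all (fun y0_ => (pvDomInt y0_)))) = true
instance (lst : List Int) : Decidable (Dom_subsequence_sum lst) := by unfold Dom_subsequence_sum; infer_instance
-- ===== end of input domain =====

-- B replaces A's carried recurrence (new_val = new_count*diff + 2*old_val, unbounded intermediates, running
-- mod) by the independent per-gap closed form Σ (s[k]-s[k-1])·(pow(2,k,M)-1)·(pow(2,n-k,M)-1) with one final
-- mod (objective: faster — a timing run measured it; A's carried values grow to n bits, B's stay bounded).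
-- Like A, B sorts the argument list in place; the equivalence proved is about the return value (the mutation
-- is identical in both).

-- ===== PORT A =====
-- loop body of A's for-loop; state = (old_val, last_count, total, old_two)
def pvStepA (s : List Int) (st : Int × Int × Int × Int) (i : Int) : Int × Int × Int × Int :=
  let diff := PySem.List.pyGetD s i 0 - PySem.List.pyGetD s (i - 1) 0
  let old_two := st.2.2.2 * 2
  let new_count := st.2.1 + old_two
  let new_val := new_count * diff + 2 * st.1
  let total := PySem.Int.mod (st.2.2.1 + new_val) 1000000007
  (new_val, new_count, total, old_two)

def subsequence_sum (lst : List Int) : Int :=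
  if lst.length < 2 then 0
  else
    let s := PySem.List.sorted lst (fun x => x) false
    let old_val := PySem.List.pyGetD s 1 0 - PySem.List.pyGetD s 0 0
    let st := (PySem.List.pyRange 2 (PySem.List.len s) 1).foldl (pvStepA s) (old_val, 1, old_val, 1)
    st.2.2.1

-- ===== PORT B =====
-- loop body of B's for-loop; Python's pow(2, e, M) is ported as PySem.Int.powMod 2 e.toNat M (exact: every e reached is ≥ 1)
def pvStepB (s : List Int) (n : Int) (total : Int) (k : Int) : Int :=
  total + (PySem.List.pyGetD s k 0 - PySem.List.pyGetD s (k - 1) 0)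
    * (PySem.Int.powMod 2 k.toNat 1000000007 - 1) * (PySem.Int.powMod 2 (n - k).toNat 1000000007 - 1)

def subsequence_sum_alt (lst : List Int) : Int :=
  if lst.length < 2 then 0
  else
    let s := PySem.List.sorted lst (fun x => x) false
    let n := PySem.List.len s
    PySem.Int.mod ((PySem.List.pyRange 1 n 1).foldl (pvStepB s n) 0) 1000000007

-- ===== PRECONDITION & SPEC =====
-- On two-element lists whose gap is at least 10^9+7, A returns the raw difference max-min (its loop never
-- runs, so the mod is never applied), while B returns it reduced mod 10^9+7, the modular answer the
-- function intends and applies everywhere else.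
def D_subsequence_sum (lst : List Int) : Prop :=
  lst.length = 2 ∧ 1000000007 ≤ |lst.getD 0 0 - lst.getD 1 0|
instance (lst : List Int) : Decidable (D_subsequence_sum lst) := by unfold D_subsequence_sum; infer_instance

def Spec_subsequence_sum (lst : List Int) (out : Int) : Prop := ¬ D_subsequence_sum lst → out = subsequence_sum_alt lst
instance (lst : List Int) (out : Int) : Decidable (Spec_subsequence_sum lst out) := by unfold Spec_subsequence_sum; infer_instance

def pvDiffWitness_subsequence_sum : List Int := [0, 1000000007]
def pvDiffWitnessOut_subsequence_sum : Int × Int := (1000000007, 0)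

-- ===== CLAIM (what is proved, stated in full; the proofs are below) =====
def Claim_unchanged_subsequence_sum : Prop := ∀ (lst : List Int), Dom_subsequence_sum lst → Spec_subsequence_sum lst (subsequence_sum lst)
def Claim_changed_subsequence_sum : Prop := Dom_subsequence_sum (pvDiffWitness_subsequence_sum) ∧ D_subsequence_sum (pvDiffWitness_subsequence_sum) ∧ subsequence_sum (pvDiffWitness_subsequence_sum) = pvDiffWitnessOut_subsequence_sum.1 ∧ subsequence_sum_alt (pvDiffWitness_subsequence_sum) = pvDiffWitnessOut_subsequence_sum.2 ∧ pvDiffWitnessOut_subsequence_sum.1 ≠ pvDiffWitnessOut_subsequence_sum.2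
def Claim_exact_subsequence_sum : Prop := ∀ (lst : List Int), Dom_subsequence_sum lst → D_subsequence_sum lst → subsequence_sum lst ≠ subsequence_sum_alt lst

-- ===== LEMMAS AND PROOFS =====

-- the k-th gap of the sorted list
def pvD (s : List Int) (k : Nat) : Int := s.getD k 0 - s.getD (k - 1) 0

-- A's value recurrence: pvW s j = old_val after the iteration i = j+1
def pvW (s : List Int) : Nat → Int
  | 0 => pvD s 1
  | j+1 => (2 ^ (j + 2) - 1) * pvD s (j + 2) + 2 * pvW s j

-- A's running total: pvT s j = total after the iteration i = j+1
def pvT (s : List Int) : Nat → Int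
  | 0 => pvD s 1
  | j+1 => PySem.Int.mod (pvT s j + pvW s (j + 1)) 1000000007

-- B's running total after processing k = 1 .. j
def pvSB (s : List Int) (n : Nat) : Nat → Int
  | 0 => 0
  | j+1 => pvSB s n j + pvD s (j + 1) * (PySem.Int.powMod 2 (j + 1) 1000000007 - 1)
      * (PySem.Int.powMod 2 (n - (j + 1)) 1000000007 - 1)

lemma pvStepA_spec (s : List Int) (j : Nat) :
    pvStepA s (pvW s j, 2 ^ (j+1) - 1, pvT s j, 2 ^ j) ((j : Int) + 2)
      = (pvW s (j+1), 2 ^ (j+2) - 1, pvT s (j+1), 2 ^ (j+1)) := by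
  have e1 : ((j : Int) + 2) = ((j + 2 : Nat) : Int) := by push_cast; ring
  have e2 : ((j : Int) + 2 - 1) = ((j + 1 : Nat) : Int) := by push_cast; ring
  have hd : PySem.List.pyGetD s ((j : Int) + 2) 0 - PySem.List.pyGetD s ((j : Int) + 2 - 1) 0
      = pvD s (j + 2) := by
    rw [e2, e1, PySem.List.pyGetD_natCast, PySem.List.pyGetD_natCast]
    simp [pvD]
  simp only [pvStepA, hd, Prod.mk.injEq]
  refine ⟨?_, ?_, ?_, ?_⟩
  · rw [pvW]; ring
  · ring
  · rw [pvT]; congr 1; rw [pvW]; ring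
  · ring

lemma lemA (s : List Int) : ∀ j : Nat,
    (PySem.List.pyRange 2 ((j : Int) + 2) 1).foldl (pvStepA s) (pvD s 1, 1, pvD s 1, 1)
      = (pvW s j, 2 ^ (j+1) - 1, pvT s j, 2 ^ j) := by
  intro j
  induction j with
  | zero =>
    rw [show ((0 : Nat) : Int) + 2 = 2 from by norm_num, PySem.List.pyRange_one_eq_nil (by omega)]
    simp [pvW, pvT]
  | succ j ih =>
    have e : ((j + 1 : Nat) : Int) + 2 = ((j : Int) + 2) + 1 := by push_cast; ring
    rw [e, PySem.List.pyRange_one_succ_right (by omega), List.foldl_append, ih]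
    simpa using pvStepA_spec s j

lemma lemB (s : List Int) (n : Nat) : ∀ j : Nat, j ≤ n →
    (PySem.List.pyRange 1 ((j : Int) + 1) 1).foldl (pvStepB s (n : Int)) 0 = pvSB s n j := by
  intro j
  induction j with
  | zero =>
    intro _
    rw [show ((0 : Nat) : Int) + 1 = 1 from by norm_num, PySem.List.pyRange_one_eq_nil (by omega)]
    rfl
  | succ j ih =>
    intro h
    have e : ((j + 1 : Nat) : Int) + 1 = ((j : Int) + 1) + 1 := by omega
    rw [e, PySem.List.pyRange_one_succ_right (by omega), List.foldl_append, ih (by omega)]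
    show pvStepB s (n : Int) (pvSB s n j) ((j : Int) + 1) = _
    have e1 : ((j : Int) + 1) = ((j + 1 : Nat) : Int) := by push_cast; ring
    have e2 : ((j : Int) + 1 - 1) = ((j : Nat) : Int) := by omega
    have e3 : ((j : Int) + 1).toNat = j + 1 := by omega
    have e4 : ((n : Int) - ((j : Int) + 1)).toNat = n - (j + 1) := by omega
    rw [pvStepB, e3, e4, e2, e1, PySem.List.pyGetD_natCast, PySem.List.pyGetD_natCast]
    simp [pvSB, pvD]

lemma portA_eval (lst : List Int) (h2 : 2 ≤ lst.length) :
    subsequence_sum lst = pvT (PySem.List.sorted lst (fun x => x) false) (lst.length - 2) := by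
  rw [subsequence_sum, if_neg (by omega)]
  set s := PySem.List.sorted lst (fun x => x) false with hs
  have hlen : s.length = lst.length := PySem.List.length_sorted lst _ false
  have hn : PySem.List.len s = ((lst.length - 2 : Nat) : Int) + 2 := by
    simp [PySem.List.len_eq, hlen]; omega
  have hinit : PySem.List.pyGetD s 1 0 - PySem.List.pyGetD s 0 0 = pvD s 1 := by
    rw [show (1 : Int) = ((1 : Nat) : Int) from rfl, show (0 : Int) = ((0 : Nat) : Int) from rfl,
      PySem.List.pyGetD_natCast, PySem.List.pyGetD_natCast]
    simp [pvD]
  simp only [hn, hinit]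
  rw [lemA s (lst.length - 2)]

lemma portB_eval (lst : List Int) (h2 : 2 ≤ lst.length) :
    subsequence_sum_alt lst
      = PySem.Int.mod (pvSB (PySem.List.sorted lst (fun x => x) false) lst.length (lst.length - 1)) 1000000007 := by
  rw [subsequence_sum_alt, if_neg (by omega)]
  set s := PySem.List.sorted lst (fun x => x) false with hs
  have hlen : s.length = lst.length := PySem.List.length_sorted lst _ false
  have hn : PySem.List.len s = ((lst.length - 1 : Nat) : Int) + 1 := by
    simp [PySem.List.len_eq, hlen]; omega
  have hn2 : PySem.List.len s = ((lst.length : Nat) : Int) := by simp [PySem.List.len_eq, hlen]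
  show PySem.Int.mod ((PySem.List.pyRange 1 (PySem.List.len s)).foldl (pvStepB s (PySem.List.len s)) 0) 1000000007 = _
  have e : PySem.List.pyRange 1 (PySem.List.len s) = PySem.List.pyRange 1 (((lst.length - 1 : Nat) : Int) + 1) := by rw [hn]
  rw [e, hn2, lemB s lst.length (lst.length - 1) (by omega)]

lemma powMod_modEq (e : Nat) : PySem.Int.powMod 2 e 1000000007 ≡ 2 ^ e [ZMOD 1000000007] := by
  rw [PySem.Int.powMod_eq, PySem.Int.mod_eq_emod_of_pos (by norm_num)]
  exact Int.emod_emod_of_dvd _ dvd_rfl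

lemma SB_mod (s : List Int) (n : Nat) : ∀ j : Nat,
    PySem.Int.mod (pvSB s n j) 1000000007
      = PySem.Int.mod (∑ k ∈ Finset.range j, pvD s (k+1) * (2 ^ (k+1) - 1) * (2 ^ (n - (k+1)) - 1)) 1000000007 := by
  have key : ∀ j : Nat,
      pvSB s n j ≡ ∑ k ∈ Finset.range j, pvD s (k+1) * (2 ^ (k+1) - 1) * (2 ^ (n - (k+1)) - 1) [ZMOD 1000000007] := by
    intro j
    induction j with
    | zero => rfl
    | succ j ih =>
      rw [Finset.sum_range_succ, pvSB]
      exact ih.add (((Int.ModEq.refl _).mul ((powMod_modEq (j+1)).sub_right 1)).mul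
        ((powMod_modEq (n - (j+1))).sub_right 1))
  intro j
  rw [PySem.Int.mod_eq_emod_of_pos (by norm_num), PySem.Int.mod_eq_emod_of_pos (by norm_num)]
  exact key j

lemma W_closed (s : List Int) : ∀ j : Nat,
    pvW s j = ∑ k ∈ Finset.range (j+1), 2 ^ (j - k) * (2 ^ (k+1) - 1) * pvD s (k+1) := by
  intro j
  induction j with
  | zero => simp [pvW]
  | succ j ih =>
    rw [Finset.sum_range_succ, pvW, ih, Finset.mul_sum]
    have h1 : ∀ k ∈ Finset.range (j+1),
        2 * (2 ^ (j - k) * (2 ^ (k+1) - 1) * pvD s (k+1))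
          = 2 ^ (j + 1 - k) * (2 ^ (k+1) - 1) * pvD s (k+1) := by
      intro k hk
      have hk' : k ≤ j := by simpa using Nat.lt_succ_iff.mp (Finset.mem_range.mp hk)
      have : j + 1 - k = (j - k) + 1 := by omega
      rw [this, pow_succ]; ring
    rw [Finset.sum_congr rfl h1]
    have : j + 1 - (j + 1) = 0 := by omega
    rw [this]; ring

lemma sum_W (s : List Int) : ∀ j : Nat,
    ∑ i ∈ Finset.range (j+1), pvW s i
      = ∑ k ∈ Finset.range (j+1), pvD s (k+1) * (2 ^ (k+1) - 1) * (2 ^ (j+1-k) - 1) := by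
  intro j
  induction j with
  | zero => simp [pvW]
  | succ j ih =>
    rw [Finset.sum_range_succ, ih, pvW]
    rw [Finset.sum_range_succ (f := fun k => pvD s (k+1) * (2 ^ (k+1) - 1) * (2 ^ (j+1+1-k) - 1))]
    have h1 : ∀ k ∈ Finset.range (j+1),
        pvD s (k+1) * (2 ^ (k+1) - 1) * (2 ^ (j+1+1-k) - 1)
          = pvD s (k+1) * (2 ^ (k+1) - 1) * (2 ^ (j+1-k) - 1)
            + 2 * (2 ^ (j - k) * (2 ^ (k+1) - 1) * pvD s (k+1)) := by
      intro k hk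
      have hk' : k ≤ j := by simpa using Nat.lt_succ_iff.mp (Finset.mem_range.mp hk)
      have e1 : j + 1 + 1 - k = (j - k) + 2 := by omega
      have e2 : j + 1 - k = (j - k) + 1 := by omega
      rw [e1, e2, pow_succ, pow_succ]; ring
    rw [Finset.sum_congr rfl h1, Finset.sum_add_distrib, ← Finset.mul_sum, ← W_closed]
    have : j + 1 + 1 - (j + 1) = 1 := by omega
    rw [this]; ring

lemma mod_add_mod' (a b : Int) :
    PySem.Int.mod (PySem.Int.mod a 1000000007 + b) 1000000007 = PySem.Int.mod (a + b) 1000000007 := by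
  rw [PySem.Int.mod_eq_emod_of_pos (by norm_num), PySem.Int.mod_eq_emod_of_pos (by norm_num),
    PySem.Int.mod_eq_emod_of_pos (by norm_num), Int.emod_add_emod]

lemma T_mod (s : List Int) : ∀ j : Nat,
    pvT s (j+1) = PySem.Int.mod (∑ i ∈ Finset.range (j+2), pvW s i) 1000000007 := by
  intro j
  induction j with
  | zero =>
    show PySem.Int.mod (pvT s 0 + pvW s 1) 1000000007 = _
    rw [Finset.sum_range_succ, Finset.sum_range_one]
    rfl
  | succ j ih =>
    show PySem.Int.mod (pvT s (j+1) + pvW s (j+2)) 1000000007 = _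
    rw [ih, mod_add_mod', Finset.sum_range_succ (n := j+2)]

lemma sorted_pair (a b : Int) :
    PySem.List.sorted [a, b] (fun x => x) false = if a ≤ b then [a, b] else [b, a] := by
  split_ifs with h
  · exact PySem.List.sorted_id_eq_of_perm_of_pairwise _ _ (List.Perm.refl _) (by simp [h])
  · exact PySem.List.sorted_id_eq_of_perm_of_pairwise _ _ (List.Perm.swap a b []) (by simp; omega)

lemma pair_vals (a b : Int) :
    subsequence_sum [a, b] = |a - b|
      ∧ subsequence_sum_alt [a, b] = PySem.Int.mod |a - b| 1000000007 := by
  have hA := portA_eval [a, b] (by simp)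
  have hB := portB_eval [a, b] (by simp)
  rw [sorted_pair] at hA hB
  simp only [List.length_cons, List.length_nil] at hA hB
  split_ifs at hA hB with h
  · have : |a - b| = b - a := by rw [abs_sub_comm, abs_of_nonneg (by omega)]
    rw [hA, hB, this]
    constructor
    · show pvD [a, b] 1 = b - a
      simp [pvD]
    · show PySem.Int.mod (pvSB [a, b] 2 1) 1000000007 = _
      congr 1
      show pvSB [a, b] 2 0 + pvD [a, b] 1 * (PySem.Int.powMod 2 1 1000000007 - 1)
          * (PySem.Int.powMod 2 (2 - 1) 1000000007 - 1) = b - a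
      simp [pvSB, pvD, show PySem.Int.powMod 2 1 1000000007 = 2 from by decide]
  · have : |a - b| = a - b := by rw [abs_of_nonneg (by omega)]
    rw [hA, hB, this]
    constructor
    · show pvD [b, a] 1 = a - b
      simp [pvD]
    · show PySem.Int.mod (pvSB [b, a] 2 1) 1000000007 = _
      congr 1
      show pvSB [b, a] 2 0 + pvD [b, a] 1 * (PySem.Int.powMod 2 1 1000000007 - 1)
          * (PySem.Int.powMod 2 (2 - 1) 1000000007 - 1) = a - b
      simp [pvSB, pvD, show PySem.Int.powMod 2 1 1000000007 = 2 from by decide]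

lemma main_ge3 (lst : List Int) (h3 : 3 ≤ lst.length) :
    subsequence_sum lst = subsequence_sum_alt lst := by
  set s := PySem.List.sorted lst (fun x => x) false with hs
  rw [portA_eval lst (by omega), portB_eval lst (by omega)]
  rw [show lst.length - 2 = (lst.length - 3) + 1 from by omega, ← hs, T_mod]
  rw [SB_mod]
  rw [show lst.length - 3 + 2 = (lst.length - 2) + 1 from by omega, sum_W]
  congr 1
  rw [show lst.length - 2 + 1 = lst.length - 1 from by omega]
  refine Finset.sum_congr rfl fun k hk => ?_
  have hk' : k < lst.length - 1 := Finset.mem_range.mp hk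
  rw [show lst.length - 1 - k = lst.length - (k + 1) from by omega]

lemma pyMod_eq_self {x : Int} (h0 : 0 ≤ x) (h1 : x < 1000000007) :
    PySem.Int.mod x 1000000007 = x := by
  rw [PySem.Int.mod_eq_emod_of_pos (by norm_num)]
  exact Int.emod_eq_of_lt h0 h1

-- ===== VERDICT (by name: the statement is the Claim_ definition above) =====
theorem subsequence_sum_spec : Claim_unchanged_subsequence_sum := by
  intro lst _ hD
  rcases lt_trichotomy lst.length 2 with h | h | h
  · rw [subsequence_sum, subsequence_sum_alt, if_pos h, if_pos h]
  · obtain ⟨a, b, rfl⟩ := List.length_eq_two.mp h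
    obtain ⟨hA, hB⟩ := pair_vals a b
    have hlt : |a - b| < 1000000007 := by
      by_contra hge
      exact hD ⟨rfl, by simpa using hge⟩
    rw [hA, hB, pyMod_eq_self (abs_nonneg _) hlt]
  · exact main_ge3 lst (by omega)

theorem subsequence_sum_changed : Claim_changed_subsequence_sum := by
  unfold Claim_changed_subsequence_sum; decide

theorem subsequence_sum_tight : Claim_exact_subsequence_sum := by
  intro lst _ hD
  obtain ⟨hlen, hge⟩ := hD
  obtain ⟨a, b, rfl⟩ := List.length_eq_two.mp hlen
  obtain ⟨hA, hB⟩ := pair_vals a b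
  have hge' : 1000000007 ≤ |a - b| := by simpa using hge
  have := PySem.Int.mod_lt |a - b| (b := 1000000007) (by norm_num)
  rw [hA, hB]
  omega
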